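-- pv_equiv track=rewrite | github.com/pbpolete7/python | Ex38.py | comparar_codis
-- ===== SOURCE A (Python) =====
-- def comparar_codis(codi, proposta):
--     # Compta xifres correctes (posició encertada)
--     correctes = sum(codi[i] == proposta[i] for i in range(4))
--
--     # Compta coincidències fora de lloc
--     # Fem llistes de xifres no encertades
--     codi_restants = []
--     proposta_restants = []
--
--     for i in range(4):
--         if codi[i] != proposta[i]:
--             codi_restants.append(codi[i])
--             proposta_restants.append(proposta[i])
--
--     # Nombre de coincidències = suma del mínim de vegades que surt cada dígit
--     coincidencies = 0
--     for x in set(proposta_restants):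
--         coincidencies += min(proposta_restants.count(x), codi_restants.count(x))
--
--     return correctes, coincidencies
-- ===== SOURCE B (Python) =====
-- def comparar_codis(codi, proposta):
--     # One pass over the four positions: count exact matches and build two
--     # digit-frequency tables; misplaced = total colour overlap - exact matches.
--     correctes = 0
--     cc = {}
--     pc = {}
--     for i in range(4):
--         if codi[i] == proposta[i]:
--             correctes += 1
--         cc[codi[i]] = cc.get(codi[i], 0) + 1
--         pc[proposta[i]] = pc.get(proposta[i], 0) + 1
--     total = 0
--     for d, n in cc.items():
--         total += min(n, pc.get(d, 0))
--     return correctes, total - correctes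
-- ===== Notes on version B (the rewrite author's own statement) =====
-- stated objective: simpler
-- what changed: B drops A's remainder-list construction and per-distinct-digit .count scans: one pass builds two frequency dicts and the misplaced count is total colour overlap minus exact matches (the Mastermind identity).
import Mathlib
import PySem

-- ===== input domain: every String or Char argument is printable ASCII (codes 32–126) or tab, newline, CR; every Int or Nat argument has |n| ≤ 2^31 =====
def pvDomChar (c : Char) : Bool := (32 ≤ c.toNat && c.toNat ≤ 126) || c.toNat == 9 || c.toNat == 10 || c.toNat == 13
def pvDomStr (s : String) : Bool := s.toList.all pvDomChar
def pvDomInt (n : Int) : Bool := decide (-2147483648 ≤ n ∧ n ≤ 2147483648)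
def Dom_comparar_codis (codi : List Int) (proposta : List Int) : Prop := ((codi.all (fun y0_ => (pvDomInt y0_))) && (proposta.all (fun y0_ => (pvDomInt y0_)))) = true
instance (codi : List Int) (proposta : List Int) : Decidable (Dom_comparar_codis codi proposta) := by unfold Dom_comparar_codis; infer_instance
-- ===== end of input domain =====

-- B replaces A's remainder lists and repeated .count scans with two frequency
-- dicts built in one pass, using the identity misplaced = overlap - exact.

-- ===== PORT A =====
def comparar_codis (codi : List Int) (proposta : List Int) : Int × Int :=
  let correctes : Int :=
    ((PySem.List.pyRange 0 4 1).map
      (fun i => if PySem.List.pyGetD codi i 0 = PySem.List.pyGetD proposta i 0 then (1 : Int) else 0)).sum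
  let rest :=
    (PySem.List.pyRange 0 4 1).foldl
      (fun (st : List Int × List Int) i =>
        if PySem.List.pyGetD codi i 0 ≠ PySem.List.pyGetD proposta i 0 then
          (st.1 ++ [PySem.List.pyGetD codi i 0], st.2 ++ [PySem.List.pyGetD proposta i 0])
        else st)
      ([], [])
  let coincidencies : Int :=
    (PySem.Set.ofList rest.2).foldl
      (fun acc x => acc + min ((PySem.List.count rest.2 x : Int)) ((PySem.List.count rest.1 x : Int))) 0
  (correctes, coincidencies)

-- ===== PORT B =====
def comparar_codis_alt (codi : List Int) (proposta : List Int) : Int × Int :=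
  let st :=
    (PySem.List.pyRange 0 4 1).foldl
      (fun (st : Int × PySem.Dict Int Int × PySem.Dict Int Int) i =>
        let correctes := if PySem.List.pyGetD codi i 0 = PySem.List.pyGetD proposta i 0 then st.1 + 1 else st.1
        let cc := st.2.1.insert (PySem.List.pyGetD codi i 0) (st.2.1.getD (PySem.List.pyGetD codi i 0) 0 + 1)
        let pc := st.2.2.insert (PySem.List.pyGetD proposta i 0) (st.2.2.getD (PySem.List.pyGetD proposta i 0) 0 + 1)
        (correctes, cc, pc))
      (0, PySem.Dict.empty, PySem.Dict.empty)
  let total : Int := st.2.1.items.foldl (fun acc dn => acc + min dn.2 (st.2.2.getD dn.1 0)) 0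
  (st.1, total - st.1)

-- ===== PRECONDITION & SPEC =====
-- Python A raises IndexError unless both lists have at least 4 elements.
def Pre_comparar_codis (codi : List Int) (proposta : List Int) : Prop :=
  4 ≤ codi.length ∧ 4 ≤ proposta.length
instance (codi : List Int) (proposta : List Int) : Decidable (Pre_comparar_codis codi proposta) := by unfold Pre_comparar_codis; infer_instance
def pvWitness_comparar_codis : List Int × List Int := ([1, 2, 3, 4], [4, 2, 1, 1])
def Spec_comparar_codis (codi : List Int) (proposta : List Int) (out : Int × Int) : Prop := out = comparar_codis_alt codi proposta
instance (codi : List Int) (proposta : List Int) (out : Int × Int) : Decidable (Spec_comparar_codis codi proposta out) := by unfold Spec_comparar_codis; infer_instance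

-- ===== CLAIM (what is proved, stated in full; the proofs are below) =====
def Claim_equal_comparar_codis : Prop := ∀ (codi : List Int) (proposta : List Int), Dom_comparar_codis codi proposta → Pre_comparar_codis codi proposta → Spec_comparar_codis codi proposta (comparar_codis codi proposta)

-- ===== LEMMAS AND PROOFS =====

-- exact-match count of a paired-up code, as an Int
def pvC (z : List (Int × Int)) : Int := (z.countP (fun q => q.1 == q.2) : Int)

-- the pairs at mismatched positions
def pvRest (z : List (Int × Int)) : List (Int × Int) := z.filter (fun q => !(q.1 == q.2))

-- sum over the distinct elements of l of min(multiplicity in l, multiplicity in k)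
def pvS (l k : List Int) : Int :=
  ((PySem.Set.ofList l).map (fun x => min ((List.count x l : Int)) ((List.count x k : Int)))).sum

lemma pvS_card (l k : List Int) :
    pvS l k = (Multiset.card ((l : Multiset Int) ∩ (k : Multiset Int)) : Int) := by
  unfold pvS
  have hmin : (fun x => min ((List.count x l : Int)) ((List.count x k : Int)))
      = fun x => ((Multiset.count x ((l : Multiset Int) ∩ (k : Multiset Int)) : Nat) : Int) := by
    funext x
    rw [Multiset.count_inter]
    simp [Nat.cast_min]
  rw [hmin]
  rw [show (fun x => ((Multiset.count x ((l : Multiset Int) ∩ (k : Multiset Int)) : Nat) : Int))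
        = (Nat.cast ∘ fun x => Multiset.count x ((l : Multiset Int) ∩ (k : Multiset Int))) from rfl,
     ← List.map_map, ← Nat.cast_list_sum]
  congr 1
  rw [← List.sum_toFinset _ (PySem.Set.nodup_ofList l)]
  have hfs : (PySem.Set.ofList l).toFinset = l.toFinset := by
    ext x; simp [PySem.Set.mem_ofList]
  rw [hfs]
  rw [← Finset.sum_subset (f := fun x => Multiset.count x ((l : Multiset Int) ∩ (k : Multiset Int)))
      (s₁ := ((l : Multiset Int) ∩ (k : Multiset Int)).toFinset)
      (by intro x hx
          rw [Multiset.mem_toFinset, Multiset.mem_inter] at hx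
          simpa [List.mem_toFinset] using hx.1)
      (by intro x _ hx
          rw [Multiset.mem_toFinset] at hx
          exact Multiset.count_eq_zero.mpr hx)]
  exact Multiset.toFinset_sum_count_eq _

lemma pvS_split (z : List (Int × Int)) :
    pvS (z.map Prod.fst) (z.map Prod.snd)
      = pvC z + pvS ((pvRest z).map Prod.snd) ((pvRest z).map Prod.fst) := by
  have key : ∀ (u s t : Multiset Int), (u + s) ∩ (u + t) = u + s ∩ t := by
    intro u s t; ext x; simp [Multiset.count_inter]
  set m := z.filter (fun q => (q.1 == q.2)) with hm
  have hmap : m.map Prod.fst = m.map Prod.snd := by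
    apply List.map_congr_left
    intro q hq
    have := (List.mem_filter.mp hq).2
    simpa using this
  have hperm : (m ++ pvRest z).Perm z := List.filter_append_perm _ z
  have h1 : (↑(z.map Prod.fst) : Multiset Int) = ↑(m.map Prod.snd) + ↑((pvRest z).map Prod.fst) := by
    rw [← hmap, Multiset.coe_add, Multiset.coe_eq_coe, ← List.map_append]
    exact ((hperm.map Prod.fst)).symm
  have h2 : (↑(z.map Prod.snd) : Multiset Int) = ↑(m.map Prod.snd) + ↑((pvRest z).map Prod.snd) := by
    rw [Multiset.coe_add, Multiset.coe_eq_coe, ← List.map_append]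
    exact ((hperm.map Prod.snd)).symm
  rw [pvS_card, pvS_card, h1, h2, key, Multiset.card_add, Multiset.inter_comm]
  have hc : (Multiset.card (↑(m.map Prod.snd) : Multiset Int) : Int) = pvC z := by
    simp [pvC, hm, List.countP_eq_length_filter]
  push_cast
  rw [hc]

lemma pvA_red (a b c d e f g h : Int) (ct pt : List Int) :
    comparar_codis (a::b::c::d::ct) (e::f::g::h::pt)
      = (pvC [(a,e),(b,f),(c,g),(d,h)],
         pvS ((pvRest [(a,e),(b,f),(c,g),(d,h)]).map Prod.snd)
             ((pvRest [(a,e),(b,f),(c,g),(d,h)]).map Prod.fst)) := by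
  have hr : PySem.List.pyRange 0 4 1 = [0,1,2,3] := by decide
  have gc0 : PySem.List.pyGetD (a::b::c::d::ct) (0:Int) 0 = a := by simp [pysem]
  have gc1 : PySem.List.pyGetD (a::b::c::d::ct) (1:Int) 0 = b := by simp [pysem]
  have gc2 : PySem.List.pyGetD (a::b::c::d::ct) (2:Int) 0 = c := by simp [pysem]
  have gc3 : PySem.List.pyGetD (a::b::c::d::ct) (3:Int) 0 = d := by simp [pysem]
  have gp0 : PySem.List.pyGetD (e::f::g::h::pt) (0:Int) 0 = e := by simp [pysem]
  have gp1 : PySem.List.pyGetD (e::f::g::h::pt) (1:Int) 0 = f := by simp [pysem]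
  have gp2 : PySem.List.pyGetD (e::f::g::h::pt) (2:Int) 0 = g := by simp [pysem]
  have gp3 : PySem.List.pyGetD (e::f::g::h::pt) (3:Int) 0 = h := by simp [pysem]
  simp only [comparar_codis, hr, List.foldl_cons, List.foldl_nil, List.map_cons, List.map_nil,
    gc0, gc1, gc2, gc3, gp0, gp1, gp2, gp3, PySem.List.foldl_add, zero_add, PySem.List.count_eq]
  by_cases h1 : a = e <;> by_cases h2 : b = f <;> by_cases h3 : c = g <;> by_cases h4 : d = h <;>
    simp [h1, h2, h3, h4, pvC, pvRest, pvS]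

lemma pvB_red (a b c d e f g h : Int) (ct pt : List Int) :
    comparar_codis_alt (a::b::c::d::ct) (e::f::g::h::pt)
      = (pvC [(a,e),(b,f),(c,g),(d,h)],
         pvS [a,b,c,d] [e,f,g,h] - pvC [(a,e),(b,f),(c,g),(d,h)]) := by
  have hr : PySem.List.pyRange 0 4 1 = [0,1,2,3] := by decide
  have gc0 : PySem.List.pyGetD (a::b::c::d::ct) (0:Int) 0 = a := by simp [pysem]
  have gc1 : PySem.List.pyGetD (a::b::c::d::ct) (1:Int) 0 = b := by simp [pysem]
  have gc2 : PySem.List.pyGetD (a::b::c::d::ct) (2:Int) 0 = c := by simp [pysem]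
  have gc3 : PySem.List.pyGetD (a::b::c::d::ct) (3:Int) 0 = d := by simp [pysem]
  have gp0 : PySem.List.pyGetD (e::f::g::h::pt) (0:Int) 0 = e := by simp [pysem]
  have gp1 : PySem.List.pyGetD (e::f::g::h::pt) (1:Int) 0 = f := by simp [pysem]
  have gp2 : PySem.List.pyGetD (e::f::g::h::pt) (2:Int) 0 = g := by simp [pysem]
  have gp3 : PySem.List.pyGetD (e::f::g::h::pt) (3:Int) 0 = h := by simp [pysem]
  simp only [comparar_codis_alt, hr, List.foldl_cons, List.foldl_nil,
    gc0, gc1, gc2, gc3, gp0, gp1, gp2, gp3]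
  change ((_ : Int),
      ((PySem.Dict.counter [a,b,c,d]).items.foldl
        (fun acc dn => acc + min dn.2 ((PySem.Dict.counter [e,f,g,h]).getD dn.1 0)) 0 : Int) - _) = _
  rw [PySem.Dict.items_counter, PySem.List.foldl_add]
  simp only [zero_add, List.map_map, Function.comp_def, PySem.Dict.getD_counter]
  simp only [pvS]
  by_cases h1 : a = e <;> by_cases h2 : b = f <;> by_cases h3 : c = g <;> by_cases h4 : d = h <;>
    simp [h1, h2, h3, h4, pvC]

-- ===== VERDICT (by name: the statement is the Claim_ definition above) =====
theorem comparar_codis_spec : Claim_equal_comparar_codis := by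
  intro codi proposta _ hpre
  obtain ⟨hc, hp⟩ := hpre
  match codi, proposta with
  | a::b::c::d::ct, e::f::g::h::pt =>
    show comparar_codis _ _ = comparar_codis_alt _ _
    rw [pvA_red, pvB_red]
    have hz := pvS_split [(a,e),(b,f),(c,g),(d,h)]
    simp only [List.map_cons, List.map_nil] at hz
    rw [show pvS [a,b,c,d] [e,f,g,h] - pvC [(a,e),(b,f),(c,g),(d,h)]
          = pvS ((pvRest [(a,e),(b,f),(c,g),(d,h)]).map Prod.snd)
               ((pvRest [(a,e),(b,f),(c,g),(d,h)]).map Prod.fst) from by omega]
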